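-- pv_equiv track=rewrite | github.com/msmannan00/Orion-Crawler | app/crawler/crawler_services/shared/helper_method.py | normalize_slashes
-- ===== SOURCE A (Python) =====
-- def normalize_slashes(p_url):
--   p_url = str(p_url)
--   segments = p_url.split('/')
--   correct_segments = []
--   for segment in segments:
--     if segment != '':
--       correct_segments.append(segment)
--   normalized_url = '/'.join(correct_segments)
--   normalized_url = normalized_url.replace("http:/", "http://")
--   normalized_url = normalized_url.replace("https:/", "https://")
--   normalized_url = normalized_url.replace("ftp:/", "ftp://")
--   return normalized_url
-- ===== SOURCE B (Python) =====
-- def normalize_slashes(p_url):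
--   p_url = str(p_url)
--   out = []
--   prev_slash = False
--   for ch in p_url:
--     if ch == '/':
--       if not prev_slash:
--         out.append(ch)
--       prev_slash = True
--     else:
--       out.append(ch)
--       prev_slash = False
--   normalized_url = ''.join(out).strip('/')
--   normalized_url = normalized_url.replace("http:/", "http://")
--   normalized_url = normalized_url.replace("https:/", "https://")
--   normalized_url = normalized_url.replace("ftp:/", "ftp://")
--   return normalized_url
-- ===== Notes on version B (the rewrite author's own statement) =====
-- stated objective: alternative
-- what changed: Replaces the split-into-segments / filter-empties / join pipeline with a single character scan that skips a slash following another slash (no segment list is maintained), then strips boundary slashes; the three protocol replacements are kept verbatim.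
import Mathlib
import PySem

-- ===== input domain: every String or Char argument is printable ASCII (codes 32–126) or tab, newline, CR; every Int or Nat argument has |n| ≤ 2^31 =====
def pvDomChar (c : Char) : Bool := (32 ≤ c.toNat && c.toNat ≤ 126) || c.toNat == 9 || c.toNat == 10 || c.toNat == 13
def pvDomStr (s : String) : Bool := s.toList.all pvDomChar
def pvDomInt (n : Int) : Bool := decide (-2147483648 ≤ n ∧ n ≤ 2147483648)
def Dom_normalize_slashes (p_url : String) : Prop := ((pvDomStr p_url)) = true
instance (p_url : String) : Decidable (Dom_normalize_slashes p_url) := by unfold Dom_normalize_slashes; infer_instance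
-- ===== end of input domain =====

-- B collapses runs of slashes in one scan and strips boundary slashes instead of
-- splitting into segments, filtering empties and joining (an alternative decomposition, same cost).

-- ===== PORT A =====
def normalize_slashes (p_url : String) : String :=
  let segments := PySem.Chars.splitOn p_url.toList ['/']
  let correct_segments := segments.foldl
    (fun acc segment => if segment ≠ [] then acc ++ [segment] else acc) []
  let normalized_url := PySem.Chars.join ['/'] correct_segments
  let normalized_url := PySem.Chars.replace normalized_url "http:/".toList "http://".toList
  let normalized_url := PySem.Chars.replace normalized_url "https:/".toList "https://".toList
  let normalized_url := PySem.Chars.replace normalized_url "ftp:/".toList "ftp://".toList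
  String.ofList normalized_url

-- ===== PORT B =====
def normalize_slashes_alt (p_url : String) : String :=
  let st := p_url.toList.foldl
    (fun (st : List Char × Bool) ch =>
      if ch = '/' then ((if st.2 then st.1 else st.1 ++ [ch]), true)
      else (st.1 ++ [ch], false)) ([], false)
  let normalized_url := PySem.Chars.stripChars st.1 ['/']
  let normalized_url := PySem.Chars.replace normalized_url "http:/".toList "http://".toList
  let normalized_url := PySem.Chars.replace normalized_url "https:/".toList "https://".toList
  let normalized_url := PySem.Chars.replace normalized_url "ftp:/".toList "ftp://".toList
  String.ofList normalized_url

-- ===== PRECONDITION & SPEC =====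
def Spec_normalize_slashes (p_url : String) (out : String) : Prop := out = normalize_slashes_alt p_url
instance (p_url : String) (out : String) : Decidable (Spec_normalize_slashes p_url out) := by unfold Spec_normalize_slashes; infer_instance

-- ===== CLAIM (what is proved, stated in full; the proofs are below) =====
def Claim_equal_normalize_slashes : Prop := ∀ (p_url : String), Dom_normalize_slashes p_url → Spec_normalize_slashes p_url (normalize_slashes p_url)

-- ===== LEMMAS AND PROOFS =====

-- reference recursion for A's split-on-'/'
def splitRec (cur : List Char) : List Char → List (List Char)
  | [] => [cur]
  | c :: r => if c = '/' then cur :: splitRec [] r else splitRec (cur ++ [c]) r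

-- reference recursion for B's collapse scan
def collRec : Bool → List Char → List Char
  | _, [] => []
  | prev, c :: r =>
    if c = '/' then (if prev then collRec true r else '/' :: collRec true r)
    else c :: collRec false r

def rsSlash (xs : List Char) : List Char :=
  (List.dropWhile (fun c => ['/'].contains c) xs.reverse).reverse

lemma splitOn_go_eq (fuel : Nat) : ∀ (l cur : List Char) (accs : List (List Char)),
    l.length ≤ fuel →
    PySem.Chars.splitOn.go ['/'] fuel l cur accs = accs.reverse ++ splitRec cur.reverse l := by
  induction fuel with
  | zero =>
    intro l cur accs h
    have hl : l = [] := List.eq_nil_of_length_eq_zero (Nat.le_zero.mp h)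
    subst hl
    simp [PySem.Chars.splitOn.go, splitRec]
  | succ fuel ih =>
    intro l cur accs h
    cases l with
    | nil => simp [PySem.Chars.splitOn.go, splitRec]
    | cons c rest =>
      by_cases hc : c = '/'
      · subst hc
        have hpre : List.isPrefixOf ['/'] ('/' :: rest) = true := by
          simp [List.isPrefixOf]
        simp only [PySem.Chars.splitOn.go, hpre, if_true, List.length_cons] at *
        have hdrop : List.drop (List.length ([] : List Char) + 1) ('/' :: rest) = rest := by simp
        rw [hdrop, ih rest [] (cur.reverse :: accs) (by omega)]
        simp [splitRec]
      · have hpre : List.isPrefixOf ['/'] (c :: rest) = false := by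
          simp [List.isPrefixOf]
          exact fun h => absurd h.symm hc
        simp only [PySem.Chars.splitOn.go, hpre, Bool.false_eq_true, if_false,
          List.length_cons] at *
        rw [ih rest (c :: cur) accs (by omega)]
        simp [splitRec, hc]

lemma splitOn_eq (cs : List Char) : PySem.Chars.splitOn cs ['/'] = splitRec [] cs := by
  have := splitOn_go_eq (cs.length + 1) cs [] [] (by omega)
  simpa [PySem.Chars.splitOn] using this

lemma foldl_filter_eq (l : List (List Char)) (init : List (List Char)) :
    l.foldl (fun acc segment => if segment ≠ [] then acc ++ [segment] else acc) init
      = init ++ l.filter (fun s => s ≠ []) := by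
  induction l generalizing init with
  | nil => simp
  | cons x r ih =>
    rw [List.foldl_cons, ih]
    by_cases hx : x = [] <;> simp [hx]

lemma foldl_coll_eq (l : List Char) : ∀ (acc : List Char) (prev : Bool),
    (l.foldl (fun (st : List Char × Bool) ch =>
      if ch = '/' then ((if st.2 then st.1 else st.1 ++ [ch]), true)
      else (st.1 ++ [ch], false)) (acc, prev)).1 = acc ++ collRec prev l := by
  induction l with
  | nil => simp [collRec]
  | cons c r ih =>
    intro acc prev
    by_cases hc : c = '/'
    · by_cases hp : prev <;> simp [List.foldl, hc, hp, ih, collRec]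
    · simp [List.foldl, hc, ih, collRec]

lemma collRec_true_head : ∀ (r : List Char) (hl : 0 < (collRec true r).length),
    ¬ (collRec true r)[0] = '/' := by
  intro r
  induction r with
  | nil => simp [collRec]
  | cons c r ih =>
    by_cases hc : c = '/' <;> simp [collRec, hc] <;> try exact ih

lemma dropWhile_coll (cs : List Char) : ∀ (b : Bool),
    List.dropWhile (fun c => ['/'].contains c) (collRec b cs) = collRec true cs := by
  induction cs with
  | nil => intro b; simp [collRec]
  | cons c r ih =>
    intro b
    by_cases hc : c = '/'
    · subst hc
      cases b <;> simp [collRec, ih] <;> exact collRec_true_head r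
    · simp [collRec, hc]

lemma rsSlash_append_nonslash (x y : List Char) (hx : ∀ c ∈ x, c ≠ '/') :
    rsSlash (x ++ y) = x ++ rsSlash y := by
  unfold rsSlash
  rw [List.reverse_append, List.dropWhile_append]
  have hx' : List.dropWhile (fun c => ['/'].contains c) x.reverse = x.reverse := by
    apply List.dropWhile_eq_self_iff.mpr
    intro h hp
    exact absurd (by simpa using hp) (hx _ (by simpa using List.head_mem h))
  by_cases hy : (List.dropWhile (fun c => ['/'].contains c) y.reverse).isEmpty
  · rw [if_pos hy, hx']
    have h0 : List.dropWhile (fun c => ['/'].contains c) y.reverse = [] :=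
      List.isEmpty_iff.mp hy
    rw [h0]
    simp
  · rw [if_neg hy]
    simp

lemma rsSlash_slash_cons (y : List Char) :
    rsSlash ('/' :: y) = if rsSlash y = [] then [] else '/' :: rsSlash y := by
  unfold rsSlash
  rw [show ('/' :: y).reverse = y.reverse ++ ['/'] by simp, List.dropWhile_append]
  by_cases hy : (List.dropWhile (fun c => ['/'].contains c) y.reverse).isEmpty
  · have h0 : List.dropWhile (fun c => ['/'].contains c) y.reverse = [] :=
      List.isEmpty_iff.mp hy
    rw [if_pos hy]
    have hr : (List.dropWhile (fun c => ['/'].contains c) y.reverse).reverse = [] := by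
      rw [h0]; rfl
    rw [if_pos hr]
    simp [List.dropWhile]
  · have h0 : List.dropWhile (fun c => ['/'].contains c) y.reverse ≠ [] := by
      simpa [List.isEmpty_iff] using hy
    rw [if_neg hy]
    have hr : (List.dropWhile (fun c => ['/'].contains c) y.reverse).reverse ≠ [] := by
      simpa using h0
    rw [if_neg hr]
    simp

lemma intercalate_cons_ne (x : List Char) (l : List (List Char)) (h : l ≠ []) :
    List.intercalate ['/'] (x :: l) = x ++ '/' :: List.intercalate ['/'] l := by
  obtain ⟨y, l', rfl⟩ := List.exists_cons_of_ne_nil h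
  simp [List.intercalate]

lemma inter_ne (L : List (List Char)) (hne : L ≠ []) (hall : ∀ s ∈ L, s ≠ []) :
    List.intercalate ['/'] L ≠ [] := by
  obtain ⟨x, l, rfl⟩ := List.exists_cons_of_ne_nil hne
  cases l with
  | nil => simpa [List.intercalate] using hall x (by simp)
  | cons y l' =>
    rw [intercalate_cons_ne _ _ (by simp)]
    simp

lemma main_core (n : Nat) : ∀ (cs : List Char), cs.length ≤ n →
    (List.intercalate ['/'] ((splitRec [] cs).filter (fun s => s ≠ [])) = rsSlash (collRec true cs)
     ∧ ∀ (cur : List Char), cur ≠ [] → (∀ c ∈ cur, c ≠ '/') →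
        List.intercalate ['/'] ((splitRec cur cs).filter (fun s => s ≠ []))
          = cur ++ rsSlash (collRec false cs)) := by
  induction n with
  | zero =>
    intro cs hcs
    have h0 : cs = [] := List.eq_nil_of_length_eq_zero (Nat.le_zero.mp hcs)
    subst h0
    constructor
    · simp [splitRec, collRec, rsSlash, List.intercalate]
    · intro cur hcur _
      simp [splitRec, collRec, rsSlash, hcur, List.intercalate]
  | succ n ih =>
    intro cs hcs
    cases cs with
    | nil => exact ih [] (by simp)
    | cons c r =>
      have hr : r.length ≤ n := by simpa using hcs
      constructor
      · by_cases hc : c = '/'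
        · subst hc
          simpa [splitRec, collRec] using (ih r hr).1
        · have h2 := (ih r hr).2 [c] (by simp) (by simpa using hc)
          rw [show splitRec [] (c :: r) = splitRec [c] r by simp [splitRec, hc], h2]
          rw [show collRec true (c :: r) = c :: collRec false r by simp [collRec, hc]]
          rw [show (c :: collRec false r) = [c] ++ collRec false r from rfl,
              rsSlash_append_nonslash [c] _ (by simpa using hc)]
      · intro cur hcur hns
        by_cases hc : c = '/'
        · subst hc
          rw [show splitRec cur ('/' :: r) = cur :: splitRec [] r by simp [splitRec]]
          rw [show collRec false ('/' :: r) = '/' :: collRec true r by simp [collRec]]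
          rw [List.filter_cons_of_pos (by simpa using hcur)]
          rw [rsSlash_slash_cons]
          have h1 := (ih r hr).1
          by_cases hF : (splitRec [] r).filter (fun s => s ≠ []) = []
          · have hz : rsSlash (collRec true r) = [] := by
              rw [← h1, hF]; rfl
            rw [if_pos hz, hF]
            simp [List.intercalate]
          · have hne : rsSlash (collRec true r) ≠ [] := by
              rw [← h1]
              exact inter_ne _ hF (fun s hs => by
                have := (List.mem_filter.mp hs).2
                simpa using this)
            rw [if_neg hne, intercalate_cons_ne _ _ hF, h1]
        · have hall : ∀ x ∈ cur ++ [c], x ≠ '/' := by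
            intro x hx
            rcases List.mem_append.mp hx with h | h
            · exact hns x h
            · simpa using (by simpa using h) ▸ hc
          have h2 := (ih r hr).2 (cur ++ [c]) (by simp) hall
          rw [show splitRec cur (c :: r) = splitRec (cur ++ [c]) r by simp [splitRec, hc], h2]
          rw [show collRec false (c :: r) = c :: collRec false r by simp [collRec, hc]]
          rw [show (c :: collRec false r) = [c] ++ collRec false r from rfl,
              rsSlash_append_nonslash [c] _ (by simpa using hc)]
          simp

lemma core_eq (cs : List Char) :
    PySem.Chars.join ['/'] ((PySem.Chars.splitOn cs ['/']).foldl
      (fun acc segment => if segment ≠ [] then acc ++ [segment] else acc) [])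
    = PySem.Chars.stripChars
        ((cs.foldl (fun (st : List Char × Bool) ch =>
          if ch = '/' then ((if st.2 then st.1 else st.1 ++ [ch]), true)
          else (st.1 ++ [ch], false)) ([], false)).1) ['/'] := by
  rw [splitOn_eq, foldl_filter_eq, foldl_coll_eq cs [] false]
  simp only [List.nil_append]
  unfold PySem.Chars.stripChars
  simp only [dropWhile_coll]
  have h := (main_core cs.length cs le_rfl).1
  simpa [PySem.Chars.join, rsSlash] using h

-- ===== VERDICT (by name: the statement is the Claim_ definition above) =====
theorem normalize_slashes_spec : Claim_equal_normalize_slashes := by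
  intro p_url _
  simp only [Spec_normalize_slashes, normalize_slashes, normalize_slashes_alt]
  rw [core_eq]
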